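-- pv_equiv track=rewrite | github.com/Zezineto/Compiladores | comp_3/converter_dados.py | converter_json
-- ===== SOURCE A (Python) =====
-- def converter_json(dados):
--     json_string = '[\n'
--     for registro in dados:
--         json_string += " {\n"
--         for chave, valor in registro.items():
--             json_string += f'  "{chave}": "{valor}",\n'
--         json_string = json_string.rstrip(",\n") + "\n },\n"
--     json_string = json_string.rstrip(",\n") + "\n]"
--     return json_string
-- ===== SOURCE B (Python) =====
-- def converter_json(dados):
--     registros = []
--     for registro in dados:
--         lines = [f'  "{chave}": "{valor}"' for chave, valor in registro.items()]
--         if lines: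
--             registros.append(" {\n" + ",\n".join(lines) + "\n }")
--         else:
--             registros.append(" {\n }")
--     if registros:
--         return "[\n" + ",\n".join(registros) + "\n]"
--     return "[\n]"
-- ===== Notes on version B (the rewrite author's own statement) =====
-- stated objective: faster
-- what changed: Replaces A's append-then-rstrip(',\n') accumulation (rstrip rescans the whole accumulated string after every record) with separator-aware joining: per-record lines are collected in a list and joined with ',\n', and record bodies are joined the same way, so no trailing-separator stripping is ever needed.
import Mathlib
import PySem

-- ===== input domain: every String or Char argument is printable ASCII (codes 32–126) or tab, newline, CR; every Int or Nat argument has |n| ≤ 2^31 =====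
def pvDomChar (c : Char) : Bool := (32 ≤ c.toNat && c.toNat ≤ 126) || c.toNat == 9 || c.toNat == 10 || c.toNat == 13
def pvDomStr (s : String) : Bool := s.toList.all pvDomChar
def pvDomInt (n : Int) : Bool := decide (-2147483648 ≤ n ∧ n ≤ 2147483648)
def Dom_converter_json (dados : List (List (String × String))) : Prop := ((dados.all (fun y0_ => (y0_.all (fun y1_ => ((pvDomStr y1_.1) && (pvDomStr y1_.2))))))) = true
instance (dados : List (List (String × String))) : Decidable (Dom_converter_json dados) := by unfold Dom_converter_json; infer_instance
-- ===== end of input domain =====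

-- B replaces A's append-then-rstrip(",\n") accumulation by collecting per-record lines
-- and joining them (and the record bodies) with ",\n", avoiding rstrip rescans of the accumulator (measured faster).
set_option maxRecDepth 4000


-- ===== PORT A =====
-- strip chars of Python's rstrip(",\n")
def pvStripCh (c : Char) : Bool := c == ',' || c == '\n'

-- hand port of Python's s.rstrip(",\n") (drop trailing ',' / '\n' characters); exact on all strings
def pvRstripCN (s : String) : String :=
  String.ofList ((s.toList.reverse.dropWhile pvStripCh).reverse)

def converter_json (dados : List (List (String × String))) : String :=
  let js := dados.foldl (fun js registro =>
    let js := js ++ " {\n"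
    let js := registro.foldl (fun js kv =>
      js ++ "  \"" ++ kv.1 ++ "\": \"" ++ kv.2 ++ "\",\n") js
    pvRstripCN js ++ "\n },\n") "[\n"
  pvRstripCN js ++ "\n]"

-- ===== PORT B =====
def converter_json_alt (dados : List (List (String × String))) : String :=
  let registros := dados.map (fun registro =>
    let lines := registro.map (fun kv => "  \"" ++ kv.1 ++ "\": \"" ++ kv.2 ++ "\"")
    if lines.isEmpty then " {\n }"
    else " {\n" ++ PySem.Str.join ",\n" lines ++ "\n }")
  if registros.isEmpty then "[\n]"
  else "[\n" ++ PySem.Str.join ",\n" registros ++ "\n]"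

-- ===== PRECONDITION & SPEC =====
def Spec_converter_json (dados : List (List (String × String))) (out : String) : Prop := out = converter_json_alt dados
instance (dados : List (List (String × String))) (out : String) : Decidable (Spec_converter_json dados out) := by unfold Spec_converter_json; infer_instance

-- ===== CLAIM (what is proved, stated in full; the proofs are below) =====
def Claim_equal_converter_json : Prop := ∀ (dados : List (List (String × String))), Dom_converter_json dados → Spec_converter_json dados (converter_json dados)

-- ===== LEMMAS AND PROOFS =====

-- list-level rstrip(",\n")
def rstripL (l : List Char) : List Char := (l.reverse.dropWhile pvStripCh).reverse

theorem toList_pvRstripCN (s : String) : (pvRstripCN s).toList = rstripL s.toList := by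
  simp [pvRstripCN, rstripL]

-- "ends in a non-strip character": rstrip-fixed and nonempty
def PGuard (l : List Char) : Prop := l.reverse.dropWhile pvStripCh = l.reverse ∧ l ≠ []

theorem dropWhile_all_append (p : Char → Bool) (a b : List Char)
    (h : ∀ d ∈ a, p d = true) : List.dropWhile p (a ++ b) = List.dropWhile p b := by
  induction a with
  | nil => simp
  | cons c a ih =>
    have hc : p c = true := h c (by simp)
    simp only [List.cons_append, List.dropWhile_cons, hc, if_true]
    exact ih (fun d hd => h d (by simp [hd]))

theorem PGuard_snoc (l : List Char) (c : Char) (hc : pvStripCh c = false) :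
    PGuard (l ++ [c]) := by
  constructor
  · simp [hc]
  · simp

-- the key rstrip fact: a guarded middle absorbs a strip-only suffix
theorem rstripL_guard (s t ys : List Char) (ht : PGuard t)
    (hys : ∀ d ∈ ys, pvStripCh d = true) :
    rstripL (s ++ t ++ ys) = s ++ t := by
  obtain ⟨hfix, hne⟩ := ht
  have htrev : t.reverse ≠ [] := by simpa using hne
  obtain ⟨c, l', hcl⟩ := List.exists_cons_of_ne_nil htrev
  have hc : pvStripCh c = false := by
    by_contra h
    have hc' : pvStripCh c = true := by revert h; cases pvStripCh c <;> simp
    rw [hcl] at hfix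
    simp [hc'] at hfix
    have := congrArg List.length hfix
    have hlen := List.length_dropWhile_le pvStripCh l'
    simp at this; omega
  unfold rstripL
  rw [List.reverse_append, List.reverse_append,
      dropWhile_all_append pvStripCh ys.reverse _ (fun d hd => hys d (by simpa using hd))]
  rw [hcl]
  simp only [List.cons_append, List.dropWhile_cons, hc, Bool.false_eq_true, if_false,
    List.reverse_cons, List.reverse_append]
  have := congrArg List.reverse hcl
  simp at this
  rw [this]
  simp

theorem PGuard_append (a b : List Char) (hb : PGuard b) : PGuard (a ++ b) := by
  refine ⟨?_, by simp [hb.2]⟩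
  have := rstripL_guard a b [] hb (by simp)
  simp only [List.append_nil] at this
  unfold rstripL at this
  have := congrArg List.reverse this
  simpa using this

theorem PGuard_join (sep : List Char) (l : List (List Char)) (hne : l ≠ [])
    (h : ∀ x ∈ l, PGuard x) : PGuard (PySem.Chars.join sep l) := by
  induction l with
  | nil => exact absurd rfl hne
  | cons a l ih =>
    cases l with
    | nil => simpa [PySem.Chars.join_singleton] using h a (by simp)
    | cons b l =>
      rw [PySem.Chars.join_cons_cons, List.append_assoc]
      have htail := ih (by simp) (fun x hx => h x (by simp [hx]))
      exact PGuard_append a _ (PGuard_append sep _ htail)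

-- flatten of (core ++ sep) pieces = join sep cores ++ sep, for a nonempty list
theorem flatten_snoc_sep (sep : List Char) (l : List (List Char)) (hne : l ≠ []) :
    (l.map (fun x => x ++ sep)).flatten = PySem.Chars.join sep l ++ sep := by
  induction l with
  | nil => exact absurd rfl hne
  | cons a l ih =>
    cases l with
    | nil => simp [PySem.Chars.join_singleton]
    | cons b l =>
      rw [PySem.Chars.join_cons_cons, List.map_cons, List.flatten_cons, ih (by simp)]
      simp

theorem stripAll_nl : ∀ d ∈ (['\n'] : List Char), pvStripCh d = true := by
  intro d hd
  rcases List.mem_singleton.1 hd with rfl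
  rfl
theorem stripAll_cnl : ∀ d ∈ ([',', '\n'] : List Char), pvStripCh d = true := by
  intro d hd
  rcases List.mem_cons.1 hd with rfl | hd
  · rfl
  · rcases List.mem_singleton.1 hd with rfl
    rfl
theorem PGuard_space_brace : PGuard [' ', '{'] := PGuard_snoc [' '] '{' (by decide)

-- list-level line and body
def lineL (kv : String × String) : List Char :=
  "  \"".toList ++ kv.1.toList ++ "\": \"".toList ++ kv.2.toList ++ "\"".toList

def bodyL (r : List (String × String)) : List Char :=
  if r = [] then " {\n }".toList
  else " {\n".toList ++ PySem.Chars.join ",\n".toList (r.map lineL) ++ "\n }".toList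

theorem PGuard_lineL (kv : String × String) : PGuard (lineL kv) := by
  have : lineL kv = ("  \"".toList ++ kv.1.toList ++ "\": \"".toList ++ kv.2.toList) ++ ['"'] := by
    simp [lineL]
  rw [this]; exact PGuard_snoc _ _ (by decide)

theorem PGuard_bodyL (r : List (String × String)) : PGuard (bodyL r) := by
  unfold bodyL
  split
  · exact PGuard_snoc [' ', '{', '\n', ' '] '}' (by decide)
  · have : " {\n".toList ++ PySem.Chars.join ",\n".toList (r.map lineL) ++ "\n }".toList
        = (" {\n".toList ++ PySem.Chars.join ",\n".toList (r.map lineL) ++ ['\n', ' ']) ++ ['}'] := by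
      simp
    rw [this]; exact PGuard_snoc _ _ (by decide)

theorem PGuard_join_bodyL (dados : List (List (String × String))) (h : dados ≠ []) :
    PGuard (PySem.Chars.join ",\n".toList (dados.map bodyL)) := by
  refine PGuard_join _ _ (by simp [h]) ?_
  rintro x hx
  simp only [List.mem_map] at hx
  obtain ⟨r, _, rfl⟩ := hx
  exact PGuard_bodyL r

-- inner fold of A accumulates the lines with trailing separators
theorem inner_fold (r : List (String × String)) (js : String) :
    (r.foldl (fun js kv => js ++ "  \"" ++ kv.1 ++ "\": \"" ++ kv.2 ++ "\",\n") js).toList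
      = js.toList ++ (r.map (fun kv => lineL kv ++ ",\n".toList)).flatten := by
  induction r generalizing js with
  | nil => simp
  | cons kv r ih =>
    simp only [List.foldl_cons, List.map_cons, List.flatten_cons, ih]
    simp [lineL]

-- one step of A's outer loop appends bodyL r ++ ",\n"
theorem step_eq (js : String) (r : List (String × String)) :
    (pvRstripCN (r.foldl (fun js kv => js ++ "  \"" ++ kv.1 ++ "\": \"" ++ kv.2 ++ "\",\n")
        (js ++ " {\n")) ++ "\n },\n").toList
      = js.toList ++ bodyL r ++ ",\n".toList := by
  rcases eq_or_ne r [] with hr | hr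
  · subst hr
    simp only [List.foldl_nil, String.toList_append, toList_pvRstripCN]
    have h1 : js.toList ++ " {\n".toList = js.toList ++ [' ', '{'] ++ ['\n'] := by simp
    rw [h1, rstripL_guard js.toList [' ', '{'] ['\n'] PGuard_space_brace stripAll_nl]
    simp [bodyL]
  · simp only [String.toList_append, toList_pvRstripCN, inner_fold]
    have hmap : r.map (fun kv => lineL kv ++ ",\n".toList)
        = (r.map lineL).map (fun x => x ++ ",\n".toList) := by rw [List.map_map]; rfl
    rw [hmap, flatten_snoc_sep _ _ (by simp [hr])]
    have hjoin : PGuard (PySem.Chars.join ",\n".toList (r.map lineL)) := by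
      refine PGuard_join _ _ (by simp [hr]) ?_
      rintro x hx
      simp only [List.mem_map] at hx
      obtain ⟨kv, _, rfl⟩ := hx
      exact PGuard_lineL kv
    have h2 : js.toList ++ " {\n".toList ++ (PySem.Chars.join ",\n".toList (r.map lineL) ++ ",\n".toList)
        = (js.toList ++ " {\n".toList) ++ PySem.Chars.join ",\n".toList (r.map lineL) ++ [',', '\n'] := by
      simp
    rw [h2, rstripL_guard _ _ [',', '\n'] hjoin stripAll_cnl]
    simp [bodyL, hr]

-- A's outer fold accumulates the bodies with trailing separators
theorem outer_fold (dados : List (List (String × String))) (js : String) :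
    (dados.foldl (fun js registro =>
        pvRstripCN (registro.foldl (fun js kv => js ++ "  \"" ++ kv.1 ++ "\": \"" ++ kv.2 ++ "\",\n")
          (js ++ " {\n")) ++ "\n },\n") js).toList
      = js.toList ++ (dados.map (fun r => bodyL r ++ ",\n".toList)).flatten := by
  induction dados generalizing js with
  | nil => simp
  | cons r dados ih =>
    simp only [List.foldl_cons, List.map_cons, List.flatten_cons]
    rw [ih, step_eq]
    simp

theorem converter_json_spec' (dados : List (List (String × String))) :
    converter_json dados = converter_json_alt dados := by
  apply String.toList_injective
  rcases eq_or_ne dados [] with h | h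
  · subst h; decide
  · unfold converter_json converter_json_alt
    simp only [String.toList_append, toList_pvRstripCN, outer_fold]
    have hmap : dados.map (fun r => bodyL r ++ ",\n".toList)
        = (dados.map bodyL).map (fun x => x ++ ",\n".toList) := by rw [List.map_map]; rfl
    rw [hmap, flatten_snoc_sep _ _ (by simp [h])]
    have h2 : "[\n".toList ++ (PySem.Chars.join ",\n".toList (dados.map bodyL) ++ ",\n".toList)
        = "[\n".toList ++ PySem.Chars.join ",\n".toList (dados.map bodyL) ++ [',', '\n'] := by
      simp
    rw [h2, rstripL_guard _ _ [',', '\n'] (PGuard_join_bodyL dados h) stripAll_cnl]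
    rw [if_neg (by simp [h])]
    simp only [String.toList_append, PySem.Str.toList_join, List.map_map]
    have hm : dados.map (String.toList ∘ fun registro =>
          if (registro.map (fun kv => ("  \"" ++ kv.1 ++ "\": \"" ++ kv.2 ++ "\"" : String))).isEmpty
          then (" {\n }" : String)
          else " {\n" ++ PySem.Str.join ",\n" (registro.map (fun kv => "  \"" ++ kv.1 ++ "\": \"" ++ kv.2 ++ "\"")) ++ "\n }")
        = dados.map bodyL := by
      refine List.map_congr_left ?_
      intro r _
      simp only [Function.comp]
      rcases eq_or_ne r [] with hr | hr
      · subst hr; simp [bodyL]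
      · rw [if_neg (by simp [hr])]
        simp only [String.toList_append, PySem.Str.toList_join, List.map_map, bodyL, if_neg hr]
        have : r.map (String.toList ∘ fun kv => ("  \"" ++ kv.1 ++ "\": \"" ++ kv.2 ++ "\"" : String))
            = r.map lineL := by
          refine List.map_congr_left ?_
          intro kv _
          simp [Function.comp, lineL]
        rw [this]
    rw [hm]

-- ===== VERDICT (by name: the statement is the Claim_ definition above) =====
theorem converter_json_spec : Claim_equal_converter_json := by
  intro dados _
  exact converter_json_spec' dados
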